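-- pv_equiv track=rewrite | github.com/pypi-data/pypi-code-48 | pyramid-debugtoolbar/pyramid_debugtoolbar-4.6.tar.gz/src/pyramid_debugtoolbar/utils.py | common_segment_count
-- ===== SOURCE A (Python) =====
-- def common_segment_count(path, value):
--     """Return the number of path segments common to both"""
--     i = 0
--     if len(path) <= len(value):
--         for x1, x2 in zip(path, value):
--             if x1 == x2:
--                 i += 1
--             else:
--                 return 0
--     return i
-- ===== SOURCE B (Python) =====
-- def common_segment_count(path, value):
--     """Return the number of path segments common to both"""
--     n = len(path)
--     return n if value[:n] == path else 0
-- ===== Notes on version B (the rewrite author's own statement) =====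
-- stated objective: simpler
-- what changed: Replaces the accumulating element-by-element zip loop with a single prefix test (value[:len(path)] == path) returning len(path) or 0 directly.
import Mathlib
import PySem

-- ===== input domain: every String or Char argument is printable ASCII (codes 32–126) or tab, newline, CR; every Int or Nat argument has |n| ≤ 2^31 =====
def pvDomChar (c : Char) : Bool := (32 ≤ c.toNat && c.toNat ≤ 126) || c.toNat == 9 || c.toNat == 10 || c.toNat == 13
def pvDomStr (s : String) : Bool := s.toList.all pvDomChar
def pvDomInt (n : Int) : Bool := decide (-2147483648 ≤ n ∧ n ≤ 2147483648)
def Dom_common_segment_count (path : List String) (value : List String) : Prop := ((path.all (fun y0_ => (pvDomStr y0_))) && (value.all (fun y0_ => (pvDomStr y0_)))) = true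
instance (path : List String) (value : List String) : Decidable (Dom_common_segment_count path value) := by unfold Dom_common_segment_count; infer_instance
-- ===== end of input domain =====

-- B replaces A's accumulating zip loop with a single prefix test returning len(path) or 0.

-- ===== PORT A =====
-- the 'for x1, x2 in zip(path, value)' loop with early return 0 on mismatch
def csc_loopA : List (String × String) → Int → Int
  | [], i => i
  | (x1, x2) :: rest, i => if x1 = x2 then csc_loopA rest (i + 1) else 0

def common_segment_count (path : List String) (value : List String) : Int :=
  if path.length ≤ value.length then csc_loopA (path.zip value) 0 else 0

-- ===== PORT B =====
def common_segment_count_alt (path : List String) (value : List String) : Int :=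
  let n := path.length
  if PySem.List.slice value none (some (n : Int)) = path then (n : Int) else 0

-- ===== PRECONDITION & SPEC =====
def Spec_common_segment_count (path : List String) (value : List String) (out : Int) : Prop := out = common_segment_count_alt path value
instance (path : List String) (value : List String) (out : Int) : Decidable (Spec_common_segment_count path value out) := by unfold Spec_common_segment_count; infer_instance

-- ===== CLAIM (what is proved, stated in full; the proofs are below) =====
def Claim_equal_common_segment_count : Prop := ∀ (path : List String) (value : List String), Dom_common_segment_count path value → Spec_common_segment_count path value (common_segment_count path value)

-- ===== LEMMAS AND PROOFS =====

lemma csc_slice_eq_take (value : List String) (n : Nat) :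
    PySem.List.slice value none (some (n : Int)) = value.take n :=
  PySem.List.slice_to_natCast value n

lemma csc_loopA_eq (path value : List String) (hlen : path.length ≤ value.length) :
    ∀ i : Int, csc_loopA (path.zip value) i =
      if value.take path.length = path then i + path.length else 0 := by
  induction path generalizing value with
  | nil => intro i; simp [csc_loopA]
  | cons x ps ih =>
    intro i
    cases value with
    | nil => simp at hlen
    | cons y vs =>
      have hlen' : ps.length ≤ vs.length := by simp at hlen; omega
      simp only [List.zip_cons_cons, csc_loopA, List.length_cons, List.take_succ_cons]
      by_cases hxy : x = y
      · subst hxy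
        rw [if_pos rfl, ih vs hlen' (i + 1)]
        by_cases h : vs.take ps.length = ps
        · simp [h]; push_cast; ring
        · simp [h]
      · rw [if_neg hxy]
        rw [if_neg (fun h => by injection h with h1 _; exact hxy h1.symm)]

-- ===== VERDICT (by name: the statement is the Claim_ definition above) =====
theorem common_segment_count_spec : Claim_equal_common_segment_count := by
  intro path value _
  show common_segment_count path value = common_segment_count_alt path value
  unfold common_segment_count common_segment_count_alt
  simp only [csc_slice_eq_take value path.length]
  by_cases hlen : path.length ≤ value.length
  · rw [if_pos hlen, csc_loopA_eq path value hlen]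
    by_cases h : value.take path.length = path <;> simp [h]
  · rw [if_neg hlen]
    have hne : value.take path.length ≠ path := by
      intro h
      apply hlen
      have := congrArg List.length h
      simp [List.length_take] at this
      omega
    rw [if_neg hne]
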